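-- pv_equiv track=rewrite | github.com/tatiana-belova/python | task4_6.py | my_cycle
-- ===== SOURCE A (Python) =====
-- from itertools import count, cycle
--
-- def my_cycle(my_list, finish):
--     result = []
--     n = 1
--     for i in cycle(my_list):
--         if n > finish:
--             return result
--         else:
--             result.append(i)
--             n += 1
-- ===== SOURCE B (Python) =====
-- def my_cycle(my_list, finish):
--     if finish < 1:
--         return []
--     q, r = divmod(finish, len(my_list))
--     return my_list * q + my_list[:r]
-- ===== Notes on version B (the rewrite author's own statement) =====
-- stated objective: faster
-- what changed: Replaces the element-by-element loop over itertools.cycle with a closed form: divmod(finish, len(my_list)) gives the number of whole copies and the leftover prefix, built by list repetition and slicing.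
-- outside the precondition, e.g. on my_cycle([], 0): A returns None, B returns []; on my_cycle([], 1): A returns None, B raises ZeroDivisionError
import Mathlib
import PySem

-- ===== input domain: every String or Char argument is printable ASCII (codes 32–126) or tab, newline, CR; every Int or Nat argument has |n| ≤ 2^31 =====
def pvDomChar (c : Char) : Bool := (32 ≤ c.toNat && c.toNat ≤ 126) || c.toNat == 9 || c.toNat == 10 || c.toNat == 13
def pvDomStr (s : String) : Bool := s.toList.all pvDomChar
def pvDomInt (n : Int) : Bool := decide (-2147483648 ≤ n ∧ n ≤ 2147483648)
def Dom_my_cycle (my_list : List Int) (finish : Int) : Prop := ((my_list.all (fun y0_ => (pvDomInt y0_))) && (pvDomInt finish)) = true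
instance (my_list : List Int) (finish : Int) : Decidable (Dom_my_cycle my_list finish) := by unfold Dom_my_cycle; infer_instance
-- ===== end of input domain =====

-- B replaces A's per-element loop over itertools.cycle by a divmod closed form (whole copies + prefix slice); objective: faster constant-factor bulk construction.
-- Pre_ excludes the empty list, on which A returns None (not a list); B returns [] for finish<1 and raises ZeroDivisionError otherwise.


-- ===== PORT A =====
-- 'for i in cycle(my_list)': 'rest' is what remains of the current pass; when a pass
-- is exhausted the cycle restarts from my_list. If my_list = [] the cycle yields
-- nothing and Python falls off the loop returning None (excluded by Pre_).
def myCycleGo (my_list : List Int) (finish : Int) (result : List Int) (n : Int)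
    (rest : List Int) : List Int :=
  match rest with
  | [] => result
  | x :: rs =>
    if n > finish then result
    else myCycleGo my_list finish (result ++ [x]) (n + 1) (if rs.isEmpty then my_list else rs)
termination_by (finish + 1 - n).toNat
decreasing_by omega

def my_cycle (my_list : List Int) (finish : Int) : List Int :=
  myCycleGo my_list finish [] 1 my_list

-- ===== PORT B =====
def my_cycle_alt (my_list : List Int) (finish : Int) : List Int :=
  if finish < 1 then []
  else
    match PySem.Int.divmod? finish (my_list.length : Int) with
    | none => []  -- Python B raises ZeroDivisionError here (my_list = [], outside Pre_)
    | some (q, r) => PySem.List.pyRepeat my_list q ++ PySem.List.slice my_list none (some r)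

-- ===== PRECONDITION & SPEC =====
-- Pre_ excludes the empty list: there Python A returns None (no list value) while
-- B returns [] (finish < 1) or raises ZeroDivisionError (finish ≥ 1).
def Pre_my_cycle (my_list : List Int) (finish : Int) : Prop := my_list ≠ []
instance (my_list : List Int) (finish : Int) : Decidable (Pre_my_cycle my_list finish) := by
  unfold Pre_my_cycle; infer_instance

def pvWitness_my_cycle : List Int × Int := ([3, 1, 2], 7)

def Spec_my_cycle (my_list : List Int) (finish : Int) (out : List Int) : Prop := out = my_cycle_alt my_list finish
instance (my_list : List Int) (finish : Int) (out : List Int) : Decidable (Spec_my_cycle my_list finish out) := by unfold Spec_my_cycle; infer_instance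

-- ===== CLAIM (what is proved, stated in full; the proofs are below) =====
def Claim_equal_my_cycle : Prop := ∀ (my_list : List Int) (finish : Int), Dom_my_cycle my_list finish → Pre_my_cycle my_list finish → Spec_my_cycle my_list finish (my_cycle my_list finish)

-- ===== LEMMAS AND PROOFS =====

-- Proof-only model of A's loop: take k elements cycling through L, starting at 'rest'.
def cyc (L : List Int) : Nat → List Int → List Int
  | _, [] => []
  | 0, _ => []
  | Nat.succ k, x :: rs => x :: cyc L k (if rs.isEmpty then L else rs)

theorem myCycleGo_eq_cyc (L : List Int) (f : Int) :
    ∀ (k : Nat) (res : List Int) (n : Int) (rest : List Int),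
      (f + 1 - n).toNat = k → myCycleGo L f res n rest = res ++ cyc L k rest := by
  intro k
  induction k with
  | zero =>
    intro res n rest hk
    cases rest with
    | nil => simp [myCycleGo, cyc]
    | cons x rs =>
      have hn : n > f := by omega
      simp [myCycleGo, cyc, hn]
  | succ k ih =>
    intro res n rest hk
    cases rest with
    | nil => simp [myCycleGo, cyc]
    | cons x rs =>
      have hn : ¬ n > f := by omega
      rw [myCycleGo]
      simp only [hn, if_false]
      rw [ih (res ++ [x]) (n + 1) _ (by omega), cyc]
      simp

theorem cyc_zero (L : List Int) (rest : List Int) : cyc L 0 rest = [] := by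
  cases rest <;> simp [cyc]

theorem cyc_take (L : List Int) :
    ∀ (rest : List Int) (k : Nat), k ≤ rest.length → cyc L k rest = rest.take k := by
  intro rest
  induction rest with
  | nil => intro k hk; simp at hk; simp [hk, cyc]
  | cons x rs ih =>
    intro k hk
    cases k with
    | zero => simp [cyc]
    | succ k =>
      rw [cyc]
      by_cases hrs : rs.isEmpty
      · have : rs = [] := List.isEmpty_iff.mp hrs
        subst this
        simp at hk
        simp [hk, cyc_zero]
      · simp only [hrs, Bool.false_eq_true, if_false]
        rw [ih k (by simpa using hk)]
        simp

theorem cyc_append (L : List Int) :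
    ∀ (rest : List Int) (m : Nat), rest ≠ [] →
      cyc L (rest.length + m) rest = rest ++ cyc L m L := by
  intro rest
  induction rest with
  | nil => intro m h; exact absurd rfl h
  | cons x rs ih =>
    intro m _
    have hlen : (x :: rs).length + m = (rs.length + m) + 1 := by simp; omega
    rw [hlen, cyc]
    by_cases hrs : rs.isEmpty
    · have : rs = [] := List.isEmpty_iff.mp hrs
      subst this
      simp
    · simp only [hrs, Bool.false_eq_true, if_false]
      rw [ih m (by simpa using hrs)]
      simp

theorem cyc_full (L : List Int) (hL : L ≠ []) :
    ∀ (k : Nat), cyc L k L =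
      (List.replicate (k / L.length) L).flatten ++ L.take (k % L.length) := by
  intro k
  induction k using Nat.strong_induction_on with
  | _ k ih =>
    have hlen : 0 < L.length := List.length_pos_iff.mpr hL
    by_cases hk : k < L.length
    · rw [cyc_take L L k (by omega)]
      rw [Nat.div_eq_of_lt hk, Nat.mod_eq_of_lt hk]
      simp
    · have hle : L.length ≤ k := by omega
      have hsplit : k = L.length + (k - L.length) := by omega
      rw [hsplit, cyc_append L L (k - L.length) hL,
        ih (k - L.length) (by omega)]
      have hdiv : (L.length + (k - L.length)) / L.length = (k - L.length) / L.length + 1 := by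
        rw [Nat.add_comm, Nat.add_div_right _ hlen]
      have hmod : (L.length + (k - L.length)) % L.length = (k - L.length) % L.length := by
        rw [Nat.add_comm, Nat.add_mod_right]
      rw [hdiv, hmod, List.replicate_succ, List.flatten_cons]
      simp

theorem my_cycle_spec : Claim_equal_my_cycle := by
  intro L finish _ hPre
  unfold Spec_my_cycle my_cycle my_cycle_alt
  have hlen : 0 < L.length := List.length_pos_iff.mpr hPre
  by_cases hf : finish < 1
  · have : (finish + 1 - 1).toNat = 0 := by omega
    rw [myCycleGo_eq_cyc L finish 0 [] 1 L this]
    cases L with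
    | nil => exact absurd rfl hPre
    | cons x rs => simp [cyc, hf]
  · simp only [hf, if_false]
    have hlz : (L.length : Int) ≠ 0 := by positivity
    have hfin : finish = ((finish.toNat : Nat) : Int) := by omega
    have hq : finish.fdiv (L.length : Int) = ((finish.toNat / L.length : Nat) : Int) := by
      rw [hfin]; exact_mod_cast (Int.ofNat_fdiv _ _).symm
    have hr : finish.fmod (L.length : Int) = ((finish.toNat % L.length : Nat) : Int) := by
      rw [hfin]; exact_mod_cast (Int.ofNat_fmod _ _).symm
    rw [PySem.Int.divmod?, if_neg hlz]
    rw [myCycleGo_eq_cyc L finish finish.toNat [] 1 L (by omega), cyc_full L hPre]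
    rw [hq, hr]
    simp only [List.nil_append]
    rw [PySem.List.slice_to L (by positivity)]
    simp only [PySem.List.pyRepeat]
    rw [Int.toNat_natCast, Int.toNat_natCast]
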